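-- pv_equiv track=rewrite | github.com/CodingCraftChannel/meta-puzzles | uniform-integers/level_1.py | getUniformIntegerCountInInterval
-- ===== SOURCE A (Python) =====
-- def getUniformIntegerCountInInterval(A: int, B: int) -> int:
--   res = 0
--
--   for size in range(len(str(A)), len(str(B)) + 1):
--     for i in range(1, 10):
--       num = int(str(i) * size)
--       if A <= num <= B:
--         res += 1
--       elif B < num:
--         break
--
--   return res
-- ===== SOURCE B (Python) =====
-- def getUniformIntegerCountInInterval(A: int, B: int) -> int:
--   res = 0
--   for size in range(len(str(A)), len(str(B)) + 1):
--     R = int('1' * size)          # repunit of this many digits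
--     lo = max(1, -(-A // R))      # smallest digit i with A <= i*R
--     hi = min(9, B // R)          # largest digit i with i*R <= B
--     if lo <= hi:
--       res += hi - lo + 1
--   return res
-- ===== Notes on version B (the rewrite author's own statement) =====
-- stated objective: simpler
-- what changed: The inner iterate-test-break scan over the nine candidate repeated-digit numbers per digit size is replaced by a closed-form arithmetic count: with R the repunit of that size, count the digits i in [1,9] with A <= i*R <= B via ceiling/floor division, keeping the same outer loop over digit sizes.
import Mathlib
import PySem

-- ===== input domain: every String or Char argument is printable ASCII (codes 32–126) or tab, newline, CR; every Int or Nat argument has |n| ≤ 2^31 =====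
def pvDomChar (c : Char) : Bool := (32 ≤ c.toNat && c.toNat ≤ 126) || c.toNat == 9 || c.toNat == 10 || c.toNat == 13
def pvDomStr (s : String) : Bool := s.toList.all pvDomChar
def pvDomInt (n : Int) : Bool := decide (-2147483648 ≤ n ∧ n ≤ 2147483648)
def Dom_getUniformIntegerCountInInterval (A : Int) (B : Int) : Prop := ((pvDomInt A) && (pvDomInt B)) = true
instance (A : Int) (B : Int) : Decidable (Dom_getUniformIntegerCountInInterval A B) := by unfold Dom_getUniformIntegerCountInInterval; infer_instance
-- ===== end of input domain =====

-- B replaces A's inner iterate-test-break scan over the digits 1..9 by a closed-form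
-- arithmetic count of the digits i with A <= i*repunit <= B (objective: simpler).

-- ===== PORT A =====
-- num = int(str(i) * size); the .getD 0 default is never reached in the program:
-- every size drawn from the outer range is ≥ 1, so the parse succeeds.
def pvNum (i size : Int) : Int :=
  (PySem.Int.ofChars? (PySem.List.pyRepeat (PySem.Int.toChars i) size)).getD 0

-- the inner 'for i in range(1, 10)' with its break, as structural recursion over the range
def pvInnerA (Aa Bb size : Int) : List Int → Int → Int
  | [], res => res
  | i :: rest, res =>
    let num := pvNum i size
    if Aa ≤ num ∧ num ≤ Bb then pvInnerA Aa Bb size rest (res + 1)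
    else if Bb < num then res
    else pvInnerA Aa Bb size rest res

def getUniformIntegerCountInInterval (A : Int) (B : Int) : Int :=
  (PySem.List.pyRange ((PySem.Int.toChars A).length : Int)
      (((PySem.Int.toChars B).length : Int) + 1) 1).foldl
    (fun res size => pvInnerA A B size (PySem.List.pyRange 1 10 1) res) 0

-- ===== PORT B =====
-- R = int('1' * size); as in A, size ≥ 1 in the loop so the .getD 0 default is never reached
def pvRep (size : Int) : Int :=
  (PySem.Int.ofChars? (PySem.List.pyRepeat ['1'] size)).getD 0

-- one iteration of B's loop: closed-form count of the digits i ∈ [1,9] with A ≤ i*R ≤ B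
def pvAltStep (Aa Bb res size : Int) : Int :=
  let R := pvRep size
  let lo := max 1 (-(PySem.Int.floordiv (-Aa) R))
  let hi := min 9 (PySem.Int.floordiv Bb R)
  if lo ≤ hi then res + (hi - lo + 1) else res

def getUniformIntegerCountInInterval_alt (A : Int) (B : Int) : Int :=
  (PySem.List.pyRange ((PySem.Int.toChars A).length : Int)
      (((PySem.Int.toChars B).length : Int) + 1) 1).foldl
    (fun res size => pvAltStep A B res size) 0

-- ===== PRECONDITION & SPEC =====
def Spec_getUniformIntegerCountInInterval (A : Int) (B : Int) (out : Int) : Prop := out = getUniformIntegerCountInInterval_alt A B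
instance (A : Int) (B : Int) (out : Int) : Decidable (Spec_getUniformIntegerCountInInterval A B out) := by unfold Spec_getUniformIntegerCountInInterval; infer_instance

-- ===== CLAIM (what is proved, stated in full; the proofs are below) =====
def Claim_equal_getUniformIntegerCountInInterval : Prop := ∀ (A : Int) (B : Int), Dom_getUniformIntegerCountInInterval A B → Spec_getUniformIntegerCountInInterval A B (getUniformIntegerCountInInterval A B)

-- ===== LEMMAS AND PROOFS =====

-- the break in A's inner loop never drops a hit on a strictly increasing digit list,
-- so the loop just counts the i with Aa ≤ i*R ≤ Bb
lemma pv_break_count (Aa Bb size R : Int) (hR : 0 < R) :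
    ∀ (l : List Int) (res : Int), (∀ i ∈ l, pvNum i size = i * R) → l.Pairwise (· < ·) →
      pvInnerA Aa Bb size l res
        = res + l.countP (fun i => decide (Aa ≤ i * R ∧ i * R ≤ Bb)) := by
  intro l
  induction l with
  | nil => intro res _ _; simp [pvInnerA]
  | cons i rest ih =>
    intro res H hs
    have hi : pvNum i size = i * R := H i (by simp)
    have Hrest : ∀ j ∈ rest, pvNum j size = j * R := fun j hj => H j (by simp [hj])
    rw [pvInnerA]
    simp only [hi]
    split_ifs with hin hbr
    · rw [ih (res + 1) Hrest (List.Pairwise.of_cons hs)]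
      have hc : (decide (Aa ≤ i * R ∧ i * R ≤ Bb)) = true := by
        simp [hin.1, hin.2]
      simp only [List.countP_cons, hc, if_true]
      push_cast
      omega
    · have h0 : (i :: rest).countP (fun j => decide (Aa ≤ j * R ∧ j * R ≤ Bb)) = 0 := by
        rw [List.countP_eq_zero]
        intro j hj
        simp only [decide_eq_true_eq]
        rcases List.mem_cons.1 hj with rfl | hj'
        · omega
        · have hij : i < j := (List.pairwise_cons.1 hs).1 j hj'
          have : i * R < j * R := by
            exact mul_lt_mul_of_pos_right hij hR
          omega
      rw [h0]
      simp
    · rw [ih res Hrest (List.Pairwise.of_cons hs)]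
      have hc : (decide (Aa ≤ i * R ∧ i * R ≤ Bb)) = false := by
        rw [decide_eq_false_iff_not]
        exact hin
      simp only [List.countP_cons, hc]
      push_cast
      omega

-- closed-form count of the i in [1,9] lying in the interval [p,q]
set_option maxHeartbeats 1000000 in
lemma pv_countB (p q : Int) :
    ((([1,2,3,4,5,6,7,8,9] : List Int).countP (fun i => decide (p ≤ i ∧ i ≤ q)) : Int))
      = if max 1 p ≤ min 9 q then min 9 q - max 1 p + 1 else 0 := by
  simp only [List.countP_cons, List.countP_nil, decide_eq_true_eq]
  split_ifs <;> push_cast <;> omega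

-- one loop iteration agrees, for any size whose repunit both parses produce (R > 0)
lemma pv_inner_eq (Aa Bb size res R : Int) (hR : 0 < R)
    (HB : pvRep size = R)
    (H : ∀ i ∈ PySem.List.pyRange 1 10 1, pvNum i size = i * R) :
    pvInnerA Aa Bb size (PySem.List.pyRange 1 10 1) res = pvAltStep Aa Bb res size := by
  have hq : ∀ i : Int, i * R ≤ Bb ↔ i ≤ PySem.Int.floordiv Bb R := by
    intro i; exact (PySem.Int.le_floordiv_iff_mul_le hR).symm
  have hp : ∀ i : Int, Aa ≤ i * R ↔ -(PySem.Int.floordiv (-Aa) R) ≤ i := by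
    intro i
    have h : (-i) ≤ PySem.Int.floordiv (-Aa) R ↔ (-i) * R ≤ -Aa :=
      PySem.Int.le_floordiv_iff_mul_le hR
    have h2 : (-i) * R = -(i * R) := by ring
    rw [h2] at h
    omega
  have hrange : PySem.List.pyRange (1 : Int) 10 1 = [1,2,3,4,5,6,7,8,9] := by decide
  rw [hrange] at H ⊢
  rw [pv_break_count Aa Bb size R hR _ res H (by decide)]
  have hcong : ([1,2,3,4,5,6,7,8,9] : List Int).countP (fun i => decide (Aa ≤ i * R ∧ i * R ≤ Bb))
      = ([1,2,3,4,5,6,7,8,9] : List Int).countP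
          (fun i => decide (-(PySem.Int.floordiv (-Aa) R) ≤ i ∧ i ≤ PySem.Int.floordiv Bb R)) := by
    apply List.countP_congr
    intro i _
    simp only [decide_eq_true_eq]
    rw [hp i, hq i]
  rw [hcong, pvAltStep, HB]
  rw [pv_countB]
  split_ifs <;> omega

-- str(n) is nonempty
lemma pv_toChars_len_pos (n : Int) : 1 ≤ (PySem.Int.toChars n).length := by
  have hcore : ∀ (f m : Nat) (l : List Char), l.length ≤ (Nat.toDigitsCore 10 f m l).length := by
    intro f
    induction f with
    | zero => intro m l; simp [Nat.toDigitsCore]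
    | succ f ih =>
      intro m l
      rw [Nat.toDigitsCore]
      split
      · simp
      · calc l.length ≤ (Nat.digitChar (m % 10) :: l).length := by simp
          _ ≤ _ := ih _ _
  have h : ∀ m : Nat, 1 ≤ (Nat.toDigits 10 m).length := by
    intro m
    unfold Nat.toDigits
    rw [Nat.toDigitsCore]
    split
    · simp
    · exact le_trans (by simp) (hcore _ _ _)
  unfold PySem.Int.toChars
  split
  · simp
  · exact h _

-- str(n) has at most 11 characters for |n| ≤ 2^31
lemma pv_toChars_len_le (n : Int) (h : pvDomInt n = true) :
    (PySem.Int.toChars n).length ≤ 11 := by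
  have hd : ∀ m : Nat, m ≤ 2147483648 → (Nat.toDigits 10 m).length ≤ 10 := by
    intro m hm
    exact Nat.toDigits_length 10 m 10 (by norm_num) (by omega)
  simp only [pvDomInt, decide_eq_true_eq] at h
  unfold PySem.Int.toChars
  split
  · have := hd n.natAbs (by omega)
    simp only [List.length_cons]
    omega
  · have := hd n.toNat (by omega)
    omega

-- ===== VERDICT (by name: the statement is the Claim_ definition above) =====
theorem getUniformIntegerCountInInterval_spec : Claim_equal_getUniformIntegerCountInInterval := by
  intro A B hDom
  have hB : pvDomInt B = true := by
    unfold Dom_getUniformIntegerCountInInterval at hDom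
    rw [Bool.and_eq_true] at hDom
    exact hDom.2
  unfold Spec_getUniformIntegerCountInInterval getUniformIntegerCountInInterval getUniformIntegerCountInInterval_alt
  apply PySem.List.foldl_congr_mem
  intro res size hmem
  have hlo : ((PySem.Int.toChars A).length : Int) ≤ size := ((PySem.List.mem_pyRange_one).1 hmem).1
  have hhi : size < ((PySem.Int.toChars B).length : Int) + 1 := ((PySem.List.mem_pyRange_one).1 hmem).2
  have h1 : 1 ≤ size := le_trans (by exact_mod_cast pv_toChars_len_pos A) hlo
  have h11 : size ≤ 11 := by
    have := pv_toChars_len_le B hB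
    omega
  interval_cases size
  · exact pv_inner_eq A B 1 res 1 (by decide) (by decide) (by decide)
  · exact pv_inner_eq A B 2 res 11 (by decide) (by decide) (by decide)
  · exact pv_inner_eq A B 3 res 111 (by decide) (by decide) (by decide)
  · exact pv_inner_eq A B 4 res 1111 (by decide) (by decide) (by decide)
  · exact pv_inner_eq A B 5 res 11111 (by decide) (by decide) (by decide)
  · exact pv_inner_eq A B 6 res 111111 (by decide) (by decide) (by decide)
  · exact pv_inner_eq A B 7 res 1111111 (by decide) (by decide) (by decide)
  · exact pv_inner_eq A B 8 res 11111111 (by decide) (by decide) (by decide)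
  · exact pv_inner_eq A B 9 res 111111111 (by decide) (by decide) (by decide)
  · exact pv_inner_eq A B 10 res 1111111111 (by decide) (by decide) (by decide)
  · exact pv_inner_eq A B 11 res 11111111111 (by decide) (by decide) (by decide)
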